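-- pv_equiv track=rewrite | github.com/Nesams/roboproge-2022 | OT13/OT13.py | create_goals
-- ===== SOURCE A (Python) =====
-- import math
--
-- def create_goals(world):
--     """Create the goals.
--
--     Arguments:
--       world -- a dictionary with keys as coordinates (x, y),
--                values are not used in this method.
--                e.g., {(-1, 1): ('blue-1', 'blue-sphere', (-1, 1)),
--                       (0, -1): ('red-2', 'red-sphere', (0, -1))}
--     """
--     i = 0
--     goals = []
--     for row in range(math.ceil(math.sqrt(len(world)))):
--         for col in range(math.ceil(math.sqrt(len(world)))):
--             goals.append(("is-red-goal" if i % 2 == 0 else "is-blue-goal",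
--                           (row, col)))
--             i += 1
--             if i >= len(world):
--                 return goals
--     return goals
-- ===== SOURCE B (Python) =====
-- import math
--
-- def create_goals(world):
--     n = len(world)
--     s = math.isqrt(n - 1) + 1 if n else 0  # = ceil(sqrt(n)), computed exactly
--     return [("is-red-goal" if i % 2 == 0 else "is-blue-goal", (i // s, i % s))
--             for i in range(n)]
-- ===== Notes on version B (the rewrite author's own statement) =====
-- stated objective: simpler
-- what changed: Replaced the nested row/col loops with their mid-loop early-return sentinel by a single flat comprehension over range(len(world)) that reconstructs each cell's coordinates arithmetically as (i // s, i % s), with s = ceil(sqrt(n)) computed once via math.isqrt.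
import Mathlib
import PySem

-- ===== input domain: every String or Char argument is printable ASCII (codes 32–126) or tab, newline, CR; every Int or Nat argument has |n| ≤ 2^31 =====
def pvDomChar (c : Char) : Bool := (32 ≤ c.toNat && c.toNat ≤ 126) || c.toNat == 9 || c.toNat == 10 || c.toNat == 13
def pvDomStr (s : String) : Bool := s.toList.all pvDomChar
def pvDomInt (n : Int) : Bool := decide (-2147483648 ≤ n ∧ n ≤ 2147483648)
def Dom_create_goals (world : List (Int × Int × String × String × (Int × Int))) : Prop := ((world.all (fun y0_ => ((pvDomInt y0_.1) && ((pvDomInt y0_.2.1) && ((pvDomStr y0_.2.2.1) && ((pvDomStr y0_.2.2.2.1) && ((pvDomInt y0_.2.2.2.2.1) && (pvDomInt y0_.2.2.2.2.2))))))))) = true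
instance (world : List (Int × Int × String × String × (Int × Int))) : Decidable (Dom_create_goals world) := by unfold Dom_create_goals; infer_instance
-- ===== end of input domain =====

-- B replaces A's nested row/col loops with early return by one flat pass computing
-- each cell's coordinates as (i // s, i % s); objective: simpler.

-- ===== PORT A =====
-- shared helper: len(world) for a dict = number of DISTINCT keys (the assoc list may repeat keys)
def pvDictLen (world : List (Int × Int × String × String × (Int × Int))) : Nat :=
  (PySem.Set.ofList (world.map (fun p => (p.1, p.2.1)))).length

-- shared helper: math.ceil(math.sqrt(n)) on a length n, ported exactly as ⌈√n⌉
-- (the float round trip is exact for every attainable list length); Source B's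
-- 'math.isqrt(n - 1) + 1 if n else 0' is literally this expression.
def pvCeilSqrt (n : Nat) : Nat := if n = 0 then 0 else Nat.sqrt (n - 1) + 1

-- the conditional expression "is-red-goal" if i % 2 == 0 else "is-blue-goal" (identical in both Pythons)
def pvLabel (i : Nat) : String := if i % 2 = 0 then "is-red-goal" else "is-blue-goal"

-- inner 'for col in range(s)' loop; returns (goals, i, early-return flag)
def createGoalsInner (n : Nat) (row : Int) :
    List Int → Nat → List (String × (Int × Int)) → (List (String × (Int × Int)) × Nat × Bool)
  | [], i, goals => (goals, i, false)
  | col :: cs, i, goals =>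
    let goals := goals ++ [(pvLabel i, (row, col))]
    let i := i + 1
    if n ≤ i then (goals, i, true) else createGoalsInner n row cs i goals

-- outer 'for row in range(s)' loop
def createGoalsOuter (n s : Nat) :
    List Int → Nat → List (String × (Int × Int)) → List (String × (Int × Int))
  | [], _, goals => goals
  | row :: rows, i, goals =>
    match createGoalsInner n row (PySem.List.pyRange 0 (s : Int) 1) i goals with
    | (goals', i', stop) => if stop then goals' else createGoalsOuter n s rows i' goals'

def create_goals (world : List (Int × Int × String × String × (Int × Int))) : List (String × (Int × Int)) :=
  let n := pvDictLen world
  let s := pvCeilSqrt n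
  createGoalsOuter n s (PySem.List.pyRange 0 (s : Int) 1) 0 []

-- ===== PORT B =====
def create_goals_alt (world : List (Int × Int × String × String × (Int × Int))) : List (String × (Int × Int)) :=
  let n := pvDictLen world
  let s := pvCeilSqrt n
  (List.range n).map (fun i =>
    (pvLabel i, (((i / s : Nat) : Int), ((i % s : Nat) : Int))))

-- ===== PRECONDITION & SPEC =====
def Spec_create_goals (world : List (Int × Int × String × String × (Int × Int))) (out : List (String × (Int × Int))) : Prop := out = create_goals_alt world
instance (world : List (Int × Int × String × String × (Int × Int))) (out : List (String × (Int × Int))) : Decidable (Spec_create_goals world out) := by unfold Spec_create_goals; infer_instance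

-- ===== CLAIM (what is proved, stated in full; the proofs are below) =====
def Claim_equal_create_goals : Prop := ∀ (world : List (Int × Int × String × String × (Int × Int))), Dom_create_goals world → Spec_create_goals world (create_goals world)

-- ===== LEMMAS AND PROOFS =====

-- B's entry for flat index i
def pvEnt (s i : Nat) : String × (Int × Int) :=
  (pvLabel i, (((i / s : Nat) : Int), ((i % s : Nat) : Int)))

lemma pvEnt_row_col (s r j : Nat) (hj : j < s) :
    pvEnt s (r * s + j) = (pvLabel (r * s + j), ((r : Int), (j : Int))) := by
  have hs : 0 < s := Nat.lt_of_le_of_lt (Nat.zero_le j) hj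
  have hd : (r * s + j) / s = r := by
    rw [Nat.add_comm, Nat.add_mul_div_right _ _ hs, Nat.div_eq_of_lt hj, Nat.zero_add]
  have hm : (r * s + j) % s = j := by
    rw [Nat.add_comm, Nat.add_mul_mod_self_right, Nat.mod_eq_of_lt hj]
  simp [pvEnt, hd, hm]

lemma inner_eq (n s r : Nat) : ∀ (k j : Nat) (g : List (String × (Int × Int))),
    j + k ≤ s → r * s + j < n →
    createGoalsInner n (r : Int) (PySem.List.pyRange (j : Int) ((j : Int) + (k : Int)) 1) (r * s + j) g =
      if n ≤ r * s + j + k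
      then (g ++ (List.range' (r * s + j) (n - (r * s + j))).map (pvEnt s), n, true)
      else (g ++ (List.range' (r * s + j) k).map (pvEnt s), r * s + j + k, false) := by
  intro k
  induction k with
  | zero =>
    intro j g hks hlt
    rw [PySem.List.pyRange_one_eq_nil (by simp)]
    rw [if_neg (by omega)]
    simp [createGoalsInner]
  | succ k ih =>
    intro j g hks hlt
    rw [PySem.List.pyRange_one_cons (by push_cast; omega)]
    simp only [createGoalsInner]
    have hjs : j < s := by omega
    have hent := pvEnt_row_col s r j hjs
    by_cases hstop : n ≤ r * s + j + 1
    · rw [if_pos hstop, if_pos (show n ≤ r * s + j + (k + 1) by omega)]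
      have hr : n - (r * s + j) = 1 := by omega
      rw [hr, List.range'_one, List.map_cons, List.map_nil, hent]
      have hn2 : n = r * s + j + 1 := by omega
      rw [hn2]
    · rw [if_neg hstop]
      have hrec := ih (j + 1) (g ++ [(pvLabel (r * s + j), ((r : Int), (j : Int)))])
        (by omega) (by omega)
      push_cast at hrec ⊢
      rw [show ((j : Int) + ((k : Int) + 1)) = ((j : Int) + 1 + (k : Int)) from by ring,
        show r * s + j + 1 = r * s + (j + 1) from by omega, hrec]
      have hcons : (List.range' (r * s + j) (n - (r * s + j))).map (pvEnt s)
          = pvEnt s (r * s + j) :: (List.range' (r * s + (j + 1)) (n - (r * s + (j + 1)))).map (pvEnt s) := by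
        rw [show n - (r * s + j) = (n - (r * s + (j + 1))) + 1 from by omega, List.range'_succ]
        simp [show r * s + j + 1 = r * s + (j + 1) from by omega]
      have hcons2 : (List.range' (r * s + j) (k + 1)).map (pvEnt s)
          = pvEnt s (r * s + j) :: (List.range' (r * s + (j + 1)) k).map (pvEnt s) := by
        rw [List.range'_succ]
        simp [show r * s + j + 1 = r * s + (j + 1) from by omega]
      by_cases hend : n ≤ r * s + j + (k + 1)
      · rw [if_pos (show n ≤ r * s + (j + 1) + k by omega), if_pos hend, hcons, hent]
        simp [List.append_assoc]
      · rw [if_neg (show ¬ n ≤ r * s + (j + 1) + k by omega), if_neg hend, hcons2, hent]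
        simp [List.append_assoc, Prod.ext_iff]
        omega

lemma outer_eq (n s : Nat) (hn : n ≤ s * s) : ∀ (m r : Nat) (g : List (String × (Int × Int))),
    r + m = s → r * s < n →
    createGoalsOuter n s (PySem.List.pyRange (r : Int) ((r : Int) + (m : Int)) 1) (r * s) g
      = g ++ (List.range' (r * s) (n - r * s)).map (pvEnt s) := by
  intro m
  induction m with
  | zero =>
    intro r g hrm hlt
    exfalso
    have hr : r = s := by omega
    subst hr
    omega
  | succ m ih =>
    intro r g hrm hlt
    rw [PySem.List.pyRange_one_cons (by push_cast; omega)]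
    simp only [createGoalsOuter]
    have hinner := inner_eq n s r s 0 g (by omega) (by omega)
    norm_num at hinner
    by_cases hend : n ≤ r * s + s
    · rw [if_pos hend] at hinner
      rw [hinner]
      simp
    · rw [if_neg hend] at hinner
      rw [hinner]
      simp only [Bool.false_eq_true, if_false]
      have hrec := ih (r + 1) (g ++ (List.range' (r * s) s).map (pvEnt s)) (by omega)
        (by have : (r + 1) * s = r * s + s := by ring
            omega)
      push_cast at hrec ⊢
      rw [show ((r : Int) + ((m : Int) + 1)) = ((r : Int) + 1 + (m : Int)) from by ring,
        show r * s + s = (r + 1) * s from by ring, hrec]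
      rw [List.append_assoc, ← List.map_append]
      congr 2
      rw [show (r + 1) * s = r * s + s from by ring,
        show n - r * s = s + (n - (r * s + s)) from by omega,
        ← List.range'_append_1]

lemma ceilSqrt_sq (n : Nat) : n ≤ pvCeilSqrt n * pvCeilSqrt n := by
  unfold pvCeilSqrt
  by_cases h : n = 0
  · simp [h]
  · rw [if_neg h]
    have h1 := Nat.lt_succ_sqrt (n - 1)
    simp only [Nat.succ_eq_add_one] at h1
    omega

lemma top_eq (n : Nat) :
    createGoalsOuter n (pvCeilSqrt n) (PySem.List.pyRange 0 ((pvCeilSqrt n : Nat) : Int) 1) 0 []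
      = (List.range n).map (pvEnt (pvCeilSqrt n)) := by
  by_cases h0 : n = 0
  · subst h0
    rw [show ((pvCeilSqrt 0 : Nat) : Int) = 0 from by simp [pvCeilSqrt]]
    rw [PySem.List.pyRange_one_eq_nil (by simp)]
    simp [createGoalsOuter]
  · have hsq := ceilSqrt_sq n
    have hspos : 0 < pvCeilSqrt n := by
      rcases Nat.eq_zero_or_pos (pvCeilSqrt n) with h | h
      · rw [h] at hsq; omega
      · exact h
    have houter := outer_eq n (pvCeilSqrt n) hsq (pvCeilSqrt n) 0 [] (by omega) (by omega)
    norm_num at houter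
    rw [houter, List.range_eq_range']

-- ===== VERDICT (by name: the statement is the Claim_ definition above) =====
theorem create_goals_spec : Claim_equal_create_goals := by
  intro world _
  unfold Spec_create_goals create_goals create_goals_alt
  have h := top_eq (pvDictLen world)
  simpa [pvEnt] using h
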